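-- pv_equiv track=rewrite | github.com/lusteven901228/db2025-final-project | backend.py | create_time_bits
-- ===== SOURCE A (Python) =====
-- def create_time_bits(selected_slots):
--     """
--     Create 168-bit string from selected time slots
--     Args:
--         selected_slots: dict like {("Monday", 9): True, ("Monday", 10): True, ...}
--     Returns: 168-bit string
--     """
--     days = ["Monday", "Tuesday", "Wednesday", "Thursday", "Friday", "Saturday", "Sunday"]
--     bits = ['0'] * 168
--
--     for (day, hour), is_selected in selected_slots.items():
--         if is_selected and day in days:
--             day_index = days.index(day)
--             bit_index = day_index * 24 + hour
--             if 0 <= bit_index < 168: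
--                 bits[bit_index] = '1'
--
--     return ''.join(bits)
-- ===== SOURCE B (Python) =====
-- def create_time_bits(selected_slots):
--     # Collect the valid bit indices, then build the 168-bit string as runs of
--     # zeros between consecutive selected bits (sort-then-scan construction).
--     days = ["Monday", "Tuesday", "Wednesday", "Thursday", "Friday", "Saturday", "Sunday"]
--     hits = sorted({days.index(day) * 24 + hour
--                    for (day, hour), sel in selected_slots.items()
--                    if sel and day in days
--                    and 0 <= days.index(day) * 24 + hour < 168})
--     parts = []
--     prev = 0
--     for i in hits:
--         parts.append('0' * (i - prev))
--         parts.append('1')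
--         prev = i + 1
--     parts.append('0' * (168 - prev))
--     return ''.join(parts)
-- ===== Notes on version B (the rewrite author's own statement) =====
-- stated objective: alternative
-- what changed: Instead of scatter-writing '1's into a pre-zeroed 168-char list, B collects the valid bit indices with a set comprehension, sorts them, and constructs the output as runs of zeros between consecutive selected bits (sort-then-scan run-length construction), never allocating or indexing a 168-cell buffer.
import Mathlib
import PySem

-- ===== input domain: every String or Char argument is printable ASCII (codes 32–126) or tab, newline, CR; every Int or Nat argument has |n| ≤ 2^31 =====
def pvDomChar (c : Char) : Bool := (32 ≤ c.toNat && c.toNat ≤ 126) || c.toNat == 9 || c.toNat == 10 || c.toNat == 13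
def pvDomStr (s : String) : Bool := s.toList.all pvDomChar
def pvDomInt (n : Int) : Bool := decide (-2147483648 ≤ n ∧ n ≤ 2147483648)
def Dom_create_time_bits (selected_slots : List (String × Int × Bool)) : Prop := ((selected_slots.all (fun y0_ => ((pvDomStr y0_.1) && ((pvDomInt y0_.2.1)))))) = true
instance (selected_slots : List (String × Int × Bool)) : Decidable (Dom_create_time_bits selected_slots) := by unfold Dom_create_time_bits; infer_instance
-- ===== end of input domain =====

-- B replaces A's scatter-write into a pre-zeroed 168-char list by collecting the valid bit
-- indices, sorting them, and emitting the output as runs of zeros between consecutive ones.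

def pvDays : List String :=
  ["Monday", "Tuesday", "Wednesday", "Thursday", "Friday", "Saturday", "Sunday"]

-- ===== PORT A =====
-- loop body of A: conditionally overwrite bits[bit_index] with '1'
def pvStepA (bits : List Char) (t : String × Int × Bool) : List Char :=
  if t.2.2 = true ∧ t.1 ∈ pvDays then
    let day_index : Int := ((PySem.List.index? pvDays t.1).getD 0 : Nat)
    let bit_index : Int := day_index * 24 + t.2.1
    if 0 ≤ bit_index ∧ bit_index < 168 then bits.set bit_index.toNat '1' else bits
  else bits

def create_time_bits (selected_slots : List (String × Int × Bool)) : String :=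
  String.ofList (selected_slots.foldl pvStepA (List.replicate 168 '0'))

-- ===== PORT B =====
-- body of B's set comprehension: add the bit index when all the guards hold
def pvStepB (s : PySem.Set Int) (t : String × Int × Bool) : PySem.Set Int :=
  if t.2.2 = true ∧ t.1 ∈ pvDays ∧
      0 ≤ (((PySem.List.index? pvDays t.1).getD 0 : Nat) : Int) * 24 + t.2.1 ∧
      (((PySem.List.index? pvDays t.1).getD 0 : Nat) : Int) * 24 + t.2.1 < 168 then
    PySem.Set.add s ((((PySem.List.index? pvDays t.1).getD 0 : Nat) : Int) * 24 + t.2.1)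
  else s

-- second loop of B: parts += '0'*(i-prev) and '1'; state = (parts joined so far, prev)
-- ('0' * m is empty for m ≤ 0, which .toNat reproduces exactly)
def pvStepEmit (st : List Char × Int) (i : Int) : List Char × Int :=
  (st.1 ++ List.replicate (i - st.2).toNat '0' ++ ['1'], i + 1)

def create_time_bits_alt (selected_slots : List (String × Int × Bool)) : String :=
  let hits : PySem.Set Int := selected_slots.foldl pvStepB PySem.Set.empty
  let st := (PySem.List.sorted hits (fun x => x) false).foldl pvStepEmit ([], 0)
  String.ofList (st.1 ++ List.replicate ((168 : Int) - st.2).toNat '0')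

-- ===== PRECONDITION & SPEC =====
def Spec_create_time_bits (selected_slots : List (String × Int × Bool)) (out : String) : Prop := out = create_time_bits_alt selected_slots
instance (selected_slots : List (String × Int × Bool)) (out : String) : Decidable (Spec_create_time_bits selected_slots out) := by unfold Spec_create_time_bits; infer_instance

-- ===== CLAIM (what is proved, stated in full; the proofs are below) =====
def Claim_equal_create_time_bits : Prop := ∀ (selected_slots : List (String × Int × Bool)), Dom_create_time_bits selected_slots → Spec_create_time_bits selected_slots (create_time_bits selected_slots)

-- ===== LEMMAS AND PROOFS =====

set_option maxRecDepth 4000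

lemma pvLenStepA (bits : List Char) (t : String × Int × Bool) :
    (pvStepA bits t).length = bits.length := by
  unfold pvStepA
  dsimp only
  split_ifs <;> simp

-- A's scatter loop equals the membership picture of B's collecting loop
lemma pvKey (slots : List (String × Int × Bool)) :
    ∀ (bits : List Char) (s : PySem.Set Int) (hlen : bits.length = 168),
      (∀ (i : Nat) (hi : i < 168), bits[i]'(by omega) =
        (if (i : Int) ∈ s then '1' else '0')) →
      slots.foldl pvStepA bits =
        (List.range 168).map (fun (i : Nat) =>
          if (i : Int) ∈ slots.foldl pvStepB s then '1' else '0') := by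
  induction slots with
  | nil =>
    intro bits s hlen hagree
    simp only [List.foldl_nil]
    apply List.ext_getElem (by simpa using hlen)
    intro i h1 h2
    have hi : i < 168 := by simpa using h2
    simpa [hi] using hagree i hi
  | cons t rest ih =>
    intro bits s hlen hagree
    simp only [List.foldl_cons]
    refine ih _ _ (by rw [pvLenStepA]; exact hlen) ?_
    intro i hi
    set k : Int := (((PySem.List.index? pvDays t.1).getD 0 : Nat) : Int) * 24 + t.2.1 with hk
    by_cases hsel : t.2.2 = true ∧ t.1 ∈ pvDays
    · by_cases hr : 0 ≤ k ∧ k < 168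
      · have hcond : t.2.2 = true ∧ t.1 ∈ pvDays ∧ 0 ≤ k ∧ k < 168 :=
          ⟨hsel.1, hsel.2, hr⟩
        have hA : pvStepA bits t = bits.set k.toNat '1' := by
          unfold pvStepA; dsimp only; rw [if_pos hsel, if_pos hr]
        have hB : pvStepB s t = PySem.Set.add s k := by
          unfold pvStepB; rw [if_pos hcond]
        simp only [hA, hB, List.getElem_set]
        by_cases hik : (i : Int) = k
        · rw [if_pos (by omega), if_pos ((PySem.Set.mem_add s k (i : Int)).2 (Or.inr hik))]
        · have hc : ((i : Int) ∈ PySem.Set.add s k) ↔ ((i : Int) ∈ s) := by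
            rw [PySem.Set.mem_add s k (i : Int)]
            constructor
            · rintro (h | h)
              · exact h
              · exact absurd h hik
            · exact Or.inl
          rw [if_neg (by omega), if_congr hc rfl rfl]
          exact hagree i hi
      · have hncond : ¬(t.2.2 = true ∧ t.1 ∈ pvDays ∧ 0 ≤ k ∧ k < 168) :=
          fun h => hr ⟨h.2.2.1, h.2.2.2⟩
        have hA : pvStepA bits t = bits := by
          unfold pvStepA; dsimp only; rw [if_pos hsel, if_neg hr]
        have hB : pvStepB s t = s := by
          unfold pvStepB; rw [if_neg hncond]
        simp only [hA, hB]
        exact hagree i hi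
    · have hncond : ¬(t.2.2 = true ∧ t.1 ∈ pvDays ∧ 0 ≤ k ∧ k < 168) :=
        fun h => hsel ⟨h.1, h.2.1⟩
      have hA : pvStepA bits t = bits := by
        unfold pvStepA; dsimp only; rw [if_neg hsel]
      have hB : pvStepB s t = s := by
        unfold pvStepB; rw [if_neg hncond]
      simp only [hA, hB]
      exact hagree i hi

-- every collected index lies in [0, 168)
lemma pvBounds (slots : List (String × Int × Bool)) :
    ∀ (s : PySem.Set Int), (∀ x ∈ s, 0 ≤ x ∧ x < 168) →
      ∀ x ∈ slots.foldl pvStepB s, 0 ≤ x ∧ x < 168 := by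
  induction slots with
  | nil => intro s hs; simpa using hs
  | cons t rest ih =>
    intro s hs
    simp only [List.foldl_cons]
    refine ih _ ?_
    intro x hx
    unfold pvStepB at hx
    split_ifs at hx with h1
    · rcases (PySem.Set.mem_add _ _ _).1 hx with h | h
      · exact hs x h
      · omega
    · exact hs x hx

-- the collected set has no duplicates
lemma pvNodup (slots : List (String × Int × Bool)) :
    ∀ (s : PySem.Set Int), s.Nodup → (slots.foldl pvStepB s).Nodup := by
  induction slots with
  | nil => intro s hs; simpa using hs
  | cons t rest ih =>
    intro s hs
    simp only [List.foldl_cons]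
    refine ih _ ?_
    unfold pvStepB
    split_ifs
    · exact PySem.Set.nodup_add _ _ hs
    · exact hs

-- the run-length emitter over a strictly increasing list of indices in [prev, 168)
-- produces exactly the membership picture of the remaining range
lemma pvEmitKey : ∀ (l : List Int) (acc : List Char) (prev : Int),
    0 ≤ prev → prev ≤ 168 →
    l.Pairwise (· < ·) → (∀ x ∈ l, prev ≤ x ∧ x < 168) →
    (l.foldl pvStepEmit (acc, prev)).1 ++
      List.replicate ((168 : Int) - (l.foldl pvStepEmit (acc, prev)).2).toNat '0'
    = acc ++ (List.range' prev.toNat (168 - prev.toNat)).map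
        (fun (n : Nat) => if ((n : Int) ∈ l) then '1' else '0') := by
  intro l
  induction l with
  | nil =>
    intro acc prev h0 h168 _ _
    have hlen : ((168 : Int) - prev).toNat = 168 - prev.toNat := by omega
    simp only [List.foldl_nil, List.not_mem_nil, if_false, hlen]
    rw [List.map_const', List.length_range']
  | cons i rest ih =>
    intro acc prev h0 h168 hpw hbd
    have hib : prev ≤ i ∧ i < 168 := hbd i (by simp)
    have hrest_lt : ∀ x ∈ rest, i < x := by
      intro x hx; exact (List.pairwise_cons.1 hpw).1 x hx
    simp only [List.foldl_cons]
    have hih := ih (acc ++ List.replicate (i - prev).toNat '0' ++ ['1']) (i + 1)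
      (by omega) (by omega) (List.pairwise_cons.1 hpw).2
      (by intro x hx; have := hrest_lt x hx; have := (hbd x (by simp [hx])).2; omega)
    show (rest.foldl pvStepEmit (pvStepEmit (acc, prev) i)).1 ++ _ = _
    have hstep : pvStepEmit (acc, prev) i
        = (acc ++ List.replicate (i - prev).toNat '0' ++ ['1'], i + 1) := rfl
    rw [hstep, hih]
    -- split range' prev (168 - prev) into [prev, i), {i}, [i+1, 168)
    have hsplit : 168 - prev.toNat = (i.toNat - prev.toNat) + (1 + (168 - (i + 1).toNat)) := by
      omega
    rw [hsplit, ← List.range'_append_1, ← List.range'_append_1]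
    have e1 : prev.toNat + (i.toNat - prev.toNat) = i.toNat := by omega
    have e2 : i.toNat + 1 = (i + 1).toNat := by omega
    rw [e1, e2]
    simp only [List.map_append, List.append_assoc]
    congr 1
    congr 1
    · -- zeros on [prev, i)
      symm
      rw [List.eq_replicate_iff]
      refine ⟨by simp; omega, ?_⟩
      intro b hb
      simp only [List.mem_map] at hb
      obtain ⟨n, hn, hb'⟩ := hb
      rw [List.mem_range'_1] at hn
      have hni : (n : Int) ≠ i := by omega
      have hnr : (n : Int) ∉ rest := by
        intro h; have := hrest_lt _ h; omega
      rw [← hb']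
      simp [hni, hnr]
    · congr 1
      · -- the '1' at i
        rw [List.range'_one]
        simp only [List.map_cons, List.map_nil]
        have hcast : ((i.toNat : Nat) : Int) = i := by omega
        simp [hcast]
      · -- the tail: membership in i :: rest equals membership in rest for n > i
        apply List.map_congr_left
        intro n hn
        rw [List.mem_range'_1] at hn
        have hni : (n : Int) ≠ i := by omega
        simp [hni]

lemma pvStrictSorted (s : PySem.Set Int) (hnd : s.Nodup) :
    (PySem.List.sorted s (fun x => x) false).Pairwise (· < ·) := by
  have hle := PySem.List.sorted_pairwise (xs := s) (key := fun x => x)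
  have hnd' : (PySem.List.sorted s (fun x => x) false).Nodup :=
    (PySem.List.sorted_perm (xs := s) (key := fun x => x) (rev := false)).nodup_iff.2 hnd
  have hboth := hle.and hnd'
  exact hboth.imp (fun h => lt_of_le_of_ne h.1 h.2)

-- ===== VERDICT (by name: the statement is the Claim_ definition above) =====
theorem create_time_bits_spec : Claim_equal_create_time_bits := by
  intro slots _
  unfold Spec_create_time_bits create_time_bits create_time_bits_alt
  dsimp only
  set S : PySem.Set Int := slots.foldl pvStepB PySem.Set.empty with hS
  have hnd : S.Nodup := pvNodup slots PySem.Set.empty (by simp [PySem.Set.empty])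
  have hbd : ∀ x ∈ S, 0 ≤ x ∧ x < 168 :=
    pvBounds slots PySem.Set.empty (by simp [PySem.Set.empty])
  have hemit := pvEmitKey (PySem.List.sorted S (fun x => x) false) [] 0
    (by omega) (by omega) (pvStrictSorted S hnd)
    (by intro x hx
        have hxS : x ∈ S := (PySem.List.mem_sorted S (fun x => x) false x).1 hx
        exact ⟨(hbd x hxS).1, (hbd x hxS).2⟩)
  rw [hemit]
  have hrange : List.range' (0 : Int).toNat (168 - (0 : Int).toNat) = List.range 168 := by
    simp [List.range_eq_range']
  rw [pvKey slots (List.replicate 168 '0') PySem.Set.empty (by simp)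
    (fun i hi => by rw [List.getElem_replicate, if_neg (by simp [PySem.Set.empty])])]
  rw [hrange, List.nil_append]
  congr 1
  apply List.map_congr_left
  intro n _
  rw [if_congr (PySem.List.mem_sorted S (fun x => x) false (n : Int)) rfl rfl]
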